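-- pv_equiv track=rewrite | github.com/Mips96/kamrandomizer | kamrandomizer.py | decodeSeed
-- ===== SOURCE A (Python) =====
-- def decodeSeed(seed, maxValueArray, seedBase=10):
-- 	if type(seed) is str:
-- 		seed = int(seed, seedBase)
-- 	baseShift = 0
-- 	varArray = []
-- 	for i in range(len(maxValueArray)):
-- 		bitLength = maxValueArray[i].bit_length()
-- 		varArray.append((seed>>baseShift) & ((2**bitLength)-1))
-- 		baseShift += bitLength
-- 	return varArray
-- ===== SOURCE B (Python) =====
-- def decodeSeed(seed, maxValueArray, seedBase=10):
-- 	if type(seed) is str: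
-- 		seed = int(seed, seedBase)
-- 	widths = [m.bit_length() for m in maxValueArray]
-- 	bits = []
-- 	for _ in range(sum(widths)):
-- 		bits.append(seed & 1)
-- 		seed >>= 1
-- 	out = []
-- 	pos = 0
-- 	for w in widths:
-- 		field = 0
-- 		for j in range(w):
-- 			field += bits[pos + j] << j
-- 		out.append(field)
-- 		pos += w
-- 	return out
-- ===== Notes on version B (the rewrite author's own statement) =====
-- stated objective: alternative
-- what changed: B explodes the seed into an explicit two's-complement bit list in one per-bit pass and then regroups those bits into fields in a second pass, instead of A's per-field shift-and-mask extraction with an accumulated bit offset.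
import Mathlib
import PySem

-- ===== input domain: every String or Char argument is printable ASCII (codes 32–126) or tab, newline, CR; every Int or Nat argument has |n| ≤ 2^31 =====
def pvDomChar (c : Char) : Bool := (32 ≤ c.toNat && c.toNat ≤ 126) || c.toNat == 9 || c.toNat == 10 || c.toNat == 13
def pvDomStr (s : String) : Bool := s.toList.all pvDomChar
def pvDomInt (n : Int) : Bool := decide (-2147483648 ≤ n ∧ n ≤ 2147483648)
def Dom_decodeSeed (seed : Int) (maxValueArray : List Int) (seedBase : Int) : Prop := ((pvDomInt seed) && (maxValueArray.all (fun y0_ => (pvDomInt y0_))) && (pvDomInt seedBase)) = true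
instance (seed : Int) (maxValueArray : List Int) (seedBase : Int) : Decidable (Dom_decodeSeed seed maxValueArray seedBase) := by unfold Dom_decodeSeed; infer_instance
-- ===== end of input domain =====

-- B explodes the seed into an explicit two's-complement bit list (one per-bit pass), then
-- regroups the bits into fields in a second pass — instead of A's per-field shift-and-mask
-- extraction with an accumulated bit offset (objective: alternative algorithm, same cost).
-- seed : Int here, so A's `type(seed) is str` guard is dead on this domain; seedBase is unused.

-- ===== PORT A =====
-- one step of A's loop body: state = (baseShift, varArray)
def decodeSeedStepA (maxValueArray : List Int) (seed : Int) (st : Nat × List Int) (i : Nat) : Nat × List Int :=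
  let bitLength := PySem.Int.bitLength (maxValueArray.getD i 0)
  (st.1 + bitLength, st.2 ++ [PySem.Int.band (seed >>> st.1) ((2 : Int) ^ bitLength - 1)])

def decodeSeed (seed : Int) (maxValueArray : List Int) (seedBase : Int) : List Int :=
  ((List.range maxValueArray.length).foldl (decodeSeedStepA maxValueArray seed) (0, [])).2

-- ===== PORT B =====
-- B's first loop: peel `n` low bits off the seed, least significant first
def decodeSeedBitsB (s : Int) (n : Nat) : List Int :=
  match n with
  | 0 => []
  | k + 1 => PySem.Int.band s 1 :: decodeSeedBitsB (s >>> (1 : Nat)) k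

-- B's inner loop: field = Σ_j bits[pos+j] << j   (index pos+j is always in range)
def decodeSeedFieldB (bits : List Int) (pos w : Nat) : Int :=
  (List.range w).foldl (fun f (j : Nat) => f + (bits.getD (pos + j) 0) <<< j) 0

-- B's second loop over the widths, threading the running position
def decodeSeedGroupB (bits : List Int) (pos : Nat) (ws : List Nat) : List Int :=
  match ws with
  | [] => []
  | w :: rest => decodeSeedFieldB bits pos w :: decodeSeedGroupB bits (pos + w) rest

def decodeSeed_alt (seed : Int) (maxValueArray : List Int) (seedBase : Int) : List Int :=
  let widths := maxValueArray.map PySem.Int.bitLength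
  decodeSeedGroupB (decodeSeedBitsB seed widths.sum) 0 widths

-- ===== PRECONDITION & SPEC =====
def Spec_decodeSeed (seed : Int) (maxValueArray : List Int) (seedBase : Int) (out : List Int) : Prop := out = decodeSeed_alt seed maxValueArray seedBase
instance (seed : Int) (maxValueArray : List Int) (seedBase : Int) (out : List Int) : Decidable (Spec_decodeSeed seed maxValueArray seedBase out) := by unfold Spec_decodeSeed; infer_instance

-- ===== CLAIM (what is proved, stated in full; the proofs are below) =====
def Claim_equal_decodeSeed : Prop := ∀ (seed : Int) (maxValueArray : List Int) (seedBase : Int), Dom_decodeSeed seed maxValueArray seedBase → Spec_decodeSeed seed maxValueArray seedBase (decodeSeed seed maxValueArray seedBase)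

-- ===== LEMMAS AND PROOFS =====

-- low-to-high field extraction (A's per-element operation, as a structural recursion)
def fieldsLow (s : Int) (ms : List Int) : List Int :=
  match ms with
  | [] => []
  | m :: rest =>
    let b := PySem.Int.bitLength m
    PySem.Int.band s ((2 : Int) ^ b - 1) :: fieldsLow (s >>> b) rest

def totalBits (ms : List Int) : Nat := (ms.map PySem.Int.bitLength).sum

lemma int_shiftRight_shiftRight (s : Int) (a b : Nat) :
    (s >>> a) >>> b = s >>> (a + b) := by
  rw [← Int.shiftRight_natCast_right s a, ← Int.shiftRight_natCast_right (s >>> (a : Int)) b,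
    ← Int.shiftRight_natCast_right s (a + b), Nat.cast_add, Int.shiftRight_add']

lemma totalBits_append (l : List Int) (m : Int) :
    totalBits (l ++ [m]) = totalBits l + PySem.Int.bitLength m := by
  simp [totalBits]

-- Python's  s & (2^b - 1)  is the Euclidean remainder modulo 2^b, for every sign of s
lemma band_mask (s : Int) (b : Nat) :
    PySem.Int.band s ((2 : Int) ^ b - 1) = s % ((2 : Int) ^ b) := by
  have hcast : (((2 : Nat) ^ b : Nat) : Int) = (2 : Int) ^ b := by push_cast; rfl
  have hp : (0 : Int) < 2 ^ b := by positivity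
  have h0 : (0 : Int) ≤ (2 : Int) ^ b - 1 := by omega
  have hm : ((2 : Int) ^ b - 1).toNat = 2 ^ b - 1 := by omega
  by_cases hs : 0 ≤ s
  · simp only [PySem.Int.band, if_pos hs, if_pos h0, hm,
      Nat.and_two_pow_sub_one_eq_mod]
    push_cast
    rw [Int.toNat_of_nonneg hs]
  · simp only [PySem.Int.band, if_neg hs, if_pos h0, hm]
    have hK : ((-s - 1).toNat : Int) = -s - 1 := Int.toNat_of_nonneg (by omega)
    set K : Nat := (-s - 1).toNat with hKdef
    have hsK : s = -((K : Int) + 1) := by omega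
    have hand : (2 ^ b - 1) &&& K = K % 2 ^ b := by
      rw [Nat.and_comm, Nat.and_two_pow_sub_one_eq_mod]
    rw [hand, hsK]
    have hrlt : K % 2 ^ b < 2 ^ b := Nat.mod_lt _ (Nat.two_pow_pos b)
    have hdecZ : (K : Int) = (2 : Int) ^ b * ((K / 2 ^ b : Nat) : Int) + ((K % 2 ^ b : Nat) : Int) := by
      rw [← hcast]
      exact_mod_cast congrArg (fun n : Nat => (n : Int)) (Nat.div_add_mod K (2 ^ b)).symm
    have hsplit : -((K : Int) + 1) =
        ((2 : Int) ^ b - 1 - ((K % 2 ^ b : Nat) : Int)) + (2 : Int) ^ b * (-((K / 2 ^ b : Nat) : Int) - 1) := by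
      linear_combination -1 * hdecZ
    have hrltZ : ((K % 2 ^ b : Nat) : Int) < 2 ^ b := by rw [← hcast]; exact_mod_cast hrlt
    have hr0 : (0 : Int) ≤ ((K % 2 ^ b : Nat) : Int) := Int.natCast_nonneg _
    rw [hsplit, Int.add_mul_emod_self_left, Int.emod_eq_of_lt (by omega) (by omega)]
    omega

-- peeling the last field off fieldsLow
lemma fieldsLow_append (s : Int) (l : List Int) (m : Int) :
    fieldsLow s (l ++ [m]) =
      fieldsLow s l ++ [PySem.Int.band (s >>> totalBits l) ((2 : Int) ^ PySem.Int.bitLength m - 1)] := by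
  induction l generalizing s with
  | nil => simp [fieldsLow, totalBits]
  | cons a t ih =>
    simp only [List.cons_append, fieldsLow, ih, totalBits, List.map_cons, List.sum_cons,
      int_shiftRight_shiftRight]

-- A's fold over range, index-by-index, computes (totalBits, fieldsLow)
lemma foldA_eq (l : List Int) (s : Int) :
    (List.range l.length).foldl (decodeSeedStepA l s) (0, []) = (totalBits l, fieldsLow s l) := by
  induction l using List.reverseRecOn with
  | nil => simp [totalBits, fieldsLow]
  | append_singleton t m ih =>
    have hcongr : ∀ st : Nat × List Int,
        (List.range t.length).foldl (decodeSeedStepA (t ++ [m]) s) st =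
        (List.range t.length).foldl (decodeSeedStepA t s) st := by
      intro st
      apply PySem.List.foldl_congr_mem
      intro st' i hi
      have hlt : i < t.length := List.mem_range.mp hi
      simp [decodeSeedStepA, List.getElem?_append_left hlt]
    rw [List.length_append, List.length_singleton, List.range_succ, List.foldl_append,
      List.foldl_cons, List.foldl_nil, hcongr, ih]
    simp [decodeSeedStepA, fieldsLow_append, totalBits_append]

-- the k-th peeled bit is  (s >> k) & 1
lemma bitsB_getD (n : Nat) : ∀ (s : Int) (k : Nat), k < n →
    (decodeSeedBitsB s n).getD k 0 = PySem.Int.band (s >>> k) 1 := by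
  induction n with
  | zero => intro s k h; omega
  | succ p ih =>
    intro s k h
    cases k with
    | zero =>
      simp only [decodeSeedBitsB, List.getD_cons_zero]
      congr 1
      simp [Int.shiftRight_eq_div_pow]
    | succ j =>
      simp only [decodeSeedBitsB, List.getD_cons_succ]
      rw [ih (s >>> (1 : Nat)) j (by omega), int_shiftRight_shiftRight, Nat.add_comm]

-- splitting the remainder modulo 2^(w+1) into the low remainder and the w-th bit
lemma emod_two_pow_succ (t : Int) (w : Nat) :
    t % ((2 : Int) ^ (w + 1)) = t % 2 ^ w + 2 ^ w * ((t / 2 ^ w) % 2) := by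
  have hp : (0 : Int) < 2 ^ w := by positivity
  have h1 : (2 : Int) ^ w * (t / 2 ^ w) + t % 2 ^ w = t := Int.ediv_add_emod t (2 ^ w)
  have h2 : (2 : Int) * (t / 2 ^ w / 2) + (t / 2 ^ w) % 2 = t / 2 ^ w := Int.ediv_add_emod (t / 2 ^ w) 2
  have h3 : t / 2 ^ w / 2 = t / (2 ^ w * 2) := Int.ediv_ediv_of_nonneg hp.le
  have key : t = (t % 2 ^ w + 2 ^ w * ((t / 2 ^ w) % 2)) + (2 ^ w * 2) * (t / (2 ^ w * 2)) := by
    rw [← h3]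
    linear_combination -1 * h1 - (2:Int) ^ w * h2
  have hb1 : 0 ≤ t % 2 ^ w := Int.emod_nonneg t hp.ne'
  have hb2 : t % 2 ^ w < 2 ^ w := Int.emod_lt_of_pos t hp
  have hb3 : (t / 2 ^ w) % 2 = 0 ∨ (t / 2 ^ w) % 2 = 1 := Int.emod_two_eq_zero_or_one _
  calc t % ((2 : Int) ^ (w + 1))
      = ((t % 2 ^ w + 2 ^ w * ((t / 2 ^ w) % 2)) + (2 ^ w * 2) * (t / (2 ^ w * 2))) % (2 ^ w * 2) := by
        rw [← key, pow_succ]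
    _ = (t % 2 ^ w + 2 ^ w * ((t / 2 ^ w) % 2)) % (2 ^ w * 2) := Int.add_mul_emod_self_left _ _ _
    _ = t % 2 ^ w + 2 ^ w * ((t / 2 ^ w) % 2) := by
        rcases hb3 with h | h <;> rw [h] <;> [skip; skip] <;>
          exact Int.emod_eq_of_lt (by nlinarith) (by nlinarith)

-- the inner sum over the bits of t rebuilds  t mod 2^w
lemma fieldFold (w : Nat) (t : Int) :
    (List.range w).foldl (fun f (j : Nat) => f + (PySem.Int.band (t >>> j) 1) <<< j) 0 = t % 2 ^ w := by
  induction w with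
  | zero => simp
  | succ p ih =>
    rw [List.range_succ, List.foldl_append, List.foldl_cons, List.foldl_nil, ih]
    have hb : PySem.Int.band (t >>> p) 1 = (t / 2 ^ p) % 2 := by
      have := band_mask (t >>> p) 1
      norm_num at this
      rw [this, Int.shiftRight_eq_div_pow]
      push_cast
      rfl
    rw [hb, Int.shiftLeft_eq, emod_two_pow_succ]
    ring

-- regrouping the peeled bits field by field matches the low-to-high extraction
lemma groupB_eq (ms : List Int) : ∀ (pos : Nat) (s : Int) (N : Nat), pos + totalBits ms ≤ N →
    decodeSeedGroupB (decodeSeedBitsB s N) pos (ms.map PySem.Int.bitLength) =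
      fieldsLow (s >>> pos) ms := by
  induction ms with
  | nil => intro pos s N _; rfl
  | cons m rest ih =>
    intro pos s N hle
    have hb : pos + PySem.Int.bitLength m + totalBits rest ≤ N := by
      simp [totalBits] at hle ⊢; omega
    rw [List.map_cons]
    show decodeSeedFieldB _ pos (PySem.Int.bitLength m) :: _ = _
    rw [fieldsLow]
    congr 1
    · -- the head field
      unfold decodeSeedFieldB
      have hcongr : (List.range (PySem.Int.bitLength m)).foldl
          (fun f (j : Nat) => f + ((decodeSeedBitsB s N).getD (pos + j) 0) <<< j) 0 =
          (List.range (PySem.Int.bitLength m)).foldl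
          (fun f (j : Nat) => f + (PySem.Int.band ((s >>> pos) >>> j) 1) <<< j) 0 := by
        apply PySem.List.foldl_congr_mem
        intro f j hj
        have hjlt : j < PySem.Int.bitLength m := List.mem_range.mp hj
        rw [bitsB_getD N s (pos + j) (by omega), int_shiftRight_shiftRight]
      rw [hcongr, fieldFold, band_mask]
    · rw [ih (pos + PySem.Int.bitLength m) s N (by omega), int_shiftRight_shiftRight]

-- ===== VERDICT (by name: the statement is the Claim_ definition above) =====
theorem decodeSeed_spec : Claim_equal_decodeSeed := by
  intro seed maxValueArray seedBase _
  unfold Spec_decodeSeed decodeSeed decodeSeed_alt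
  rw [foldA_eq]
  show fieldsLow seed maxValueArray = _
  rw [groupB_eq maxValueArray 0 seed ((maxValueArray.map PySem.Int.bitLength).sum) (by simp [totalBits])]
  congr 1
  simp [Int.shiftRight_eq_div_pow]
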